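-- pv_equiv track=rewrite | github.com/whlg0501/2018_PAT | 1018.py | getMostWin
-- ===== SOURCE A (Python) =====
-- def getMostWin(win_lst):
--     BCJ = ["B", "C", "J"]
--     result = [0, 0, 0]
--     for i in win_lst:
--         if(i == "B"):
--             result[0] += 1
--         elif(i == "C"):
--             result[1] += 1
--         elif(i == "J"):
--             result[2] += 1
--
--     my_max = max(result)
--     for i in range(0, len(result)):
--         if(result[i] == my_max):
--             return BCJ[i]
-- ===== SOURCE B (Python) =====
-- def getMostWin(win_lst):
--     runs = sorted(x for x in win_lst if x in ("B", "C", "J"))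
--     best, best_len = "B", 0
--     run_val, run_len = None, 0
--     for x in runs:
--         if x == run_val:
--             run_len += 1
--         else:
--             run_val, run_len = x, 1
--         if run_len > best_len:
--             best, best_len = x, run_len
--     return best
-- ===== Notes on version B (the rewrite author's own statement) =====
-- stated objective: alternative
-- what changed: Replaced A's three-counter tally and index scan by a sort-then-scan algorithm: filter the list to the three symbols, sort it, and take the symbol of the longest run (strict improvement only, so the first run wins ties, and sorted order B<C<J reproduces A's tie-break).
import Mathlib
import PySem

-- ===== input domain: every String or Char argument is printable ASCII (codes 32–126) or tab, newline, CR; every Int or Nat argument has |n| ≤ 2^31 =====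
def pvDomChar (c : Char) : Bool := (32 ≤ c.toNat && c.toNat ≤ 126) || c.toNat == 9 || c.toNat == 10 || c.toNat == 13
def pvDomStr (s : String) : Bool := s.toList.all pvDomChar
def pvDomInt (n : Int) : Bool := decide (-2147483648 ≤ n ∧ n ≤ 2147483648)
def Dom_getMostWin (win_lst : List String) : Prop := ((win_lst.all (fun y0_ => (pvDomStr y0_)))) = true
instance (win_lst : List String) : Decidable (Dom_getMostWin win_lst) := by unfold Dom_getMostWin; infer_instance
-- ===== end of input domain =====

-- B replaces A's three-counter tally and index scan by sort-then-scan: filter the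
-- list to the three symbols, sort it, and take the symbol of the longest run
-- (strict improvement only, so sorted order B<C<J reproduces A's tie-break).
-- Objective: alternative algorithm, same result.

-- ===== PORT A =====
-- tally loop: result = [r0, r1, r2], updated per element in branch order
def getMostWinTally (win_lst : List String) : Int × Int × Int :=
  win_lst.foldl
    (fun r i =>
      if i = "B" then (r.1 + 1, r.2.1, r.2.2)
      else if i = "C" then (r.1, r.2.1 + 1, r.2.2)
      else if i = "J" then (r.1, r.2.1, r.2.2 + 1)
      else r)
    (0, 0, 0)

def getMostWin (win_lst : List String) : String :=
  let r := getMostWinTally win_lst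
  let my_max := max r.1 (max r.2.1 r.2.2)     -- max(result) over the 3-element list
  -- the final scan over range(0, 3), unrolled: first index whose count equals my_max
  if r.1 = my_max then "B"
  else if r.2.1 = my_max then "C"
  else "J"

-- ===== PORT B =====
-- one step of B's run-scan loop over the sorted list;
-- state = (best, best_len, run_val, run_len)
def bcjStep (st : String × Int × Option String × Int) (x : String) :
    String × Int × Option String × Int :=
  let p : Option String × Int :=
    if st.2.2.1 = some x then (st.2.2.1, st.2.2.2 + 1) else (some x, 1)
  if p.2 > st.2.1 then (x, p.2, p.1, p.2) else (st.1, st.2.1, p.1, p.2)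

def getMostWin_alt (win_lst : List String) : String :=
  let runs := PySem.List.sorted
    (win_lst.filter (fun x => x == "B" || x == "C" || x == "J")) (fun x => x) false
  (runs.foldl bcjStep ("B", 0, none, 0)).1

-- ===== PRECONDITION & SPEC =====
def Spec_getMostWin (win_lst : List String) (out : String) : Prop := out = getMostWin_alt win_lst
instance (win_lst : List String) (out : String) : Decidable (Spec_getMostWin win_lst out) := by unfold Spec_getMostWin; infer_instance

-- ===== CLAIM (what is proved, stated in full; the proofs are below) =====
def Claim_equal_getMostWin : Prop := ∀ (win_lst : List String), Dom_getMostWin win_lst → Spec_getMostWin win_lst (getMostWin win_lst)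

-- ===== LEMMAS AND PROOFS =====

-- A's tally is the three counts
theorem getMostWinTally_eq (win_lst : List String) :
    getMostWinTally win_lst =
      ((win_lst.count "B" : Int), (win_lst.count "C" : Int), (win_lst.count "J" : Int)) := by
  unfold getMostWinTally
  suffices h : ∀ (l : List String) (a b c : Int),
      l.foldl
        (fun r i =>
          if i = "B" then (r.1 + 1, r.2.1, r.2.2)
          else if i = "C" then (r.1, r.2.1 + 1, r.2.2)
          else if i = "J" then (r.1, r.2.1, r.2.2 + 1)
          else r)
        (a, b, c) = (a + l.count "B", b + l.count "C", c + l.count "J") by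
    simpa using h win_lst 0 0 0
  intro l
  induction l with
  | nil => intro a b c; simp
  | cons x t ih =>
    intro a b c
    simp only [List.foldl_cons]
    by_cases hB : x = "B"
    · simp [hB, ih]; omega
    · by_cases hC : x = "C"
      · simp [hC, ih]; omega
      · by_cases hJ : x = "J"
        · simp [hJ, ih]; omega
        · simp [hB, hC, hJ, ih]

-- the filtered list is a permutation of the canonical B-run ++ C-run ++ J-run
theorem filter_perm_canonical (l : List String) :
    (l.filter (fun x => x == "B" || x == "C" || x == "J")).Perm
      (List.replicate (l.count "B") "B" ++
        (List.replicate (l.count "C") "C" ++ List.replicate (l.count "J") "J")) := by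
  induction l with
  | nil => simp
  | cons x t ih =>
    by_cases hB : x = "B"
    · simpa [hB, List.count_cons, List.replicate_succ] using ih.cons "B"
    · by_cases hC : x = "C"
      · subst hC
        have h1 : (("C" :: t).filter (fun x => x == "B" || x == "C" || x == "J")).Perm
            ("C" :: (List.replicate (t.count "B") "B" ++
              (List.replicate (t.count "C") "C" ++ List.replicate (t.count "J") "J"))) := by
          simpa using ih.cons "C"
        refine h1.trans ?_
        simp only [List.count_cons]
        simpa using List.perm_middle.symm
      · by_cases hJ : x = "J"
        · subst hJ
          have h1 : (("J" :: t).filter (fun x => x == "B" || x == "C" || x == "J")).Perm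
              ("J" :: (List.replicate (t.count "B") "B" ++
                (List.replicate (t.count "C") "C" ++ List.replicate (t.count "J") "J"))) := by
            simpa using ih.cons "J"
          refine h1.trans ?_
          simp only [List.count_cons]
          refine List.perm_middle.symm.trans ?_
          exact (List.perm_middle.symm.append_left (List.replicate (t.count "B") "B"))
        · simpa [hB, hC, hJ, List.count_cons] using ih

-- the canonical form is sorted (≤-pairwise), hence equals sorted(filter)
theorem sorted_filter_eq (l : List String) :
    PySem.List.sorted (l.filter (fun x => x == "B" || x == "C" || x == "J"))
        (fun x => x) false =
      List.replicate (l.count "B") "B" ++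
        (List.replicate (l.count "C") "C" ++ List.replicate (l.count "J") "J") := by
  refine PySem.List.sorted_id_eq_of_perm_of_pairwise _ _ (filter_perm_canonical l).symm ?_
  refine List.pairwise_append.2 ⟨?_, List.pairwise_append.2 ⟨?_, ?_, ?_⟩, ?_⟩
  · exact List.pairwise_replicate.2 (Or.inr le_rfl)
  · exact List.pairwise_replicate.2 (Or.inr le_rfl)
  · exact List.pairwise_replicate.2 (Or.inr le_rfl)
  · intro a ha b hb
    rw [List.eq_of_mem_replicate ha, List.eq_of_mem_replicate hb]; simp; decide
  · intro a ha b hb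
    rw [List.eq_of_mem_replicate ha]
    rcases List.mem_append.1 hb with h | h <;>
      rw [List.eq_of_mem_replicate h] <;> (simp; decide)

-- step lemmas for B's loop body
theorem bcjStep_same (best : String) (bestLen rl : Int) (x : String) :
    bcjStep (best, bestLen, some x, rl) x =
      if rl + 1 > bestLen then (x, rl + 1, some x, rl + 1)
      else (best, bestLen, some x, rl + 1) := by
  simp [bcjStep]

theorem bcjStep_new (best : String) (bestLen : Int) (rv : Option String) (rl : Int)
    (x : String) (h : rv ≠ some x) :
    bcjStep (best, bestLen, rv, rl) x =
      if 1 > bestLen then (x, 1, some x, 1) else (best, bestLen, some x, 1) := by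
  simp [bcjStep, h]

-- B's run-scan over one run of n copies of x
theorem bcjStep_replicate (x : String) (n : Nat) :
    ∀ (best : String) (bestLen : Int) (rv : Option String) (rl : Int),
      rv ≠ some x → rl ≤ bestLen → 0 ≤ bestLen →
      (List.replicate n x).foldl bcjStep (best, bestLen, rv, rl) =
        ((if bestLen < (n : Int) then x else best), max bestLen (n : Int),
          (if n = 0 then rv else some x), (if n = 0 then rl else (n : Int))) := by
  -- continuing an already-open run of x
  have cont : ∀ (m : Nat) (best : String) (bestLen rl : Int), rl ≤ bestLen →
      (List.replicate m x).foldl bcjStep (best, bestLen, some x, rl) =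
        ((if bestLen < rl + m then x else best), max bestLen (rl + m), some x, rl + m) := by
    intro m
    induction m with
    | zero =>
      intro best bestLen rl h
      simp only [List.replicate_zero, List.foldl_nil, Nat.cast_zero, add_zero]
      rw [if_neg (by omega), max_eq_left h]
    | succ m ih =>
      intro best bestLen rl h
      rw [List.replicate_succ, List.foldl_cons, bcjStep_same]
      by_cases hgt : rl + 1 > bestLen
      · rw [if_pos hgt, ih x (rl + 1) (rl + 1) le_rfl]
        simp only [Prod.mk.injEq]
        push_cast
        refine ⟨?_, by omega, trivial, by ring⟩
        split_ifs <;> first | rfl | (exfalso; omega)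
      · rw [if_neg hgt, ih best bestLen (rl + 1) (by omega)]
        simp only [Prod.mk.injEq]
        push_cast
        refine ⟨?_, by omega, trivial, by ring⟩
        split_ifs <;> first | rfl | (exfalso; omega)
  intro best bestLen rv rl hrv h hb
  cases n with
  | zero =>
    simp only [List.replicate_zero, List.foldl_nil, Nat.cast_zero]
    rw [if_neg (by omega), max_eq_left hb]
    simp
  | succ n =>
    rw [List.replicate_succ, List.foldl_cons, bcjStep_new best bestLen rv rl x hrv]
    by_cases hgt : (1 : Int) > bestLen
    · rw [if_pos hgt, cont n x 1 1 le_rfl]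
      simp only [Prod.mk.injEq]
      push_cast
      refine ⟨?_, by omega, by simp, by ring⟩
      split_ifs <;> first | rfl | (exfalso; omega)
    · rw [if_neg hgt, cont n best bestLen 1 (by omega)]
      simp only [Prod.mk.injEq]
      push_cast
      refine ⟨?_, by omega, by simp, by ring⟩
      split_ifs <;> first | rfl | (exfalso; omega)

-- ===== VERDICT (by name: the statement is the Claim_ definition above) =====
theorem getMostWin_spec : Claim_equal_getMostWin := by
  intro win_lst _
  unfold Spec_getMostWin getMostWin getMostWin_alt
  rw [getMostWinTally_eq, sorted_filter_eq]
  set b := win_lst.count "B"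
  set c := win_lst.count "C"
  set j := win_lst.count "J"
  show (if (b : Int) = max (b : Int) (max (c : Int) (j : Int)) then "B"
        else if (c : Int) = max (b : Int) (max (c : Int) (j : Int)) then "C" else "J") =
      (List.foldl bcjStep ("B", 0, none, 0)
        (List.replicate b "B" ++ (List.replicate c "C" ++ List.replicate j "J"))).1
  rw [List.foldl_append, List.foldl_append]
  rw [bcjStep_replicate "B" b "B" 0 none 0 (by simp) le_rfl le_rfl]
  rw [bcjStep_replicate "C" c _ _ _ _
      (by split_ifs <;> simp) (by split_ifs <;> omega) (by omega)]
  rw [bcjStep_replicate "J" j _ _ _ _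
      (by split_ifs <;> simp) (by split_ifs <;> omega) (by omega)]
  split_ifs <;> first | rfl | (exfalso; omega)
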